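-- pv_equiv track=rewrite | github.com/Yun04kaGasai/Bifithon | tools/bifc.py | promote_int_literals_for_division
-- ===== SOURCE A (Python) =====
-- def promote_int_literals_for_division(expr: str) -> str:
--     out = []
--     in_string = False
--     string_char = ""
--     escaped = False
--     i = 0
--
--     while i < len(expr):
--         ch = expr[i]
--
--         if in_string:
--             out.append(ch)
--             if escaped:
--                 escaped = False
--             elif ch == "\\":
--                 escaped = True
--             elif ch == string_char:
--                 in_string = False
--             i += 1
--             continue
--
--         if ch in ("\"", "'"):
--             in_string = True
--             string_char = ch
--             out.append(ch)
--             i += 1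
--             continue
--
--         if ch.isdigit() and (i == 0 or not (expr[i - 1].isalnum() or expr[i - 1] == "_")):
--             start = i
--             while i < len(expr) and expr[i].isdigit():
--                 i += 1
--
--             is_float = False
--             if i < len(expr) and expr[i] == ".":
--                 is_float = True
--                 i += 1
--                 while i < len(expr) and expr[i].isdigit():
--                     i += 1
--
--             if i < len(expr) and expr[i] in ("e", "E"):
--                 is_float = True
--                 i += 1
--                 if i < len(expr) and expr[i] in ("+", "-"):
--                     i += 1
--                 while i < len(expr) and expr[i].isdigit():
--                     i += 1
--
--             token = expr[start:i]
--             if not is_float: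
--                 token += ".0"
--             out.append(token)
--             continue
--
--         out.append(ch)
--         i += 1
--
--     return "".join(out)
-- ===== SOURCE B (Python) =====
-- def _digits_end(expr, j):
--     n = len(expr)
--     while j < n and expr[j].isdigit():
--         j += 1
--     return j
--
--
-- def _string_token_end(expr, j, quote):
--     # End (exclusive) of a quoted-string token starting just after its opening
--     # quote: escape pairs are skipped whole; a lone trailing backslash is left
--     # outside the token; an unterminated string runs to the end of the input.
--     n = len(expr)
--     while j < n:
--         c = expr[j]
--         if c == '\\':
--             if j + 1 < n:
--                 j += 2
--             else:
--                 return j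
--         elif c == quote:
--             return j + 1
--         else:
--             j += 1
--     return j
--
--
-- def _number_token_end(expr, i):
--     # End (exclusive) of a numeric token starting at the digit expr[i]:
--     # digits, optional '.' + digits, optional exponent part.
--     n = len(expr)
--     j = _digits_end(expr, i + 1)
--     if j < n and expr[j] == '.':
--         j = _digits_end(expr, j + 1)
--     if j < n and (expr[j] == 'e' or expr[j] == 'E'):
--         j += 1
--         if j < n and (expr[j] == '+' or expr[j] == '-'):
--             j += 1
--         j = _digits_end(expr, j)
--     return j
--
--
-- def promote_int_literals_for_division(expr: str) -> str:
--     # Token-based single pass: whole string literals and whole numeric tokens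
--     # are cut out by helper scanners, so no in_string/escaped state survives
--     # between iterations; integer promotion is decided by a membership test
--     # on the finished token.
--     n = len(expr)
--     pieces = []
--     i = 0
--     while i < n:
--         ch = expr[i]
--         if ch == '"' or ch == "'":
--             j = _string_token_end(expr, i + 1, ch)
--             pieces.append(expr[i:j])
--             i = j
--         elif ch.isdigit() and not (i > 0 and (expr[i - 1].isalnum() or expr[i - 1] == '_')):
--             j = _number_token_end(expr, i)
--             tok = expr[i:j]
--             pieces.append(tok if '.' in tok or 'e' in tok or 'E' in tok else tok + '.0')
--             i = j
--         else:
--             pieces.append(ch)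
--             i += 1
--     return ''.join(pieces)
-- ===== Notes on version B (the rewrite author's own statement) =====
-- stated objective: alternative
-- what changed: Replaces A's character-at-a-time state machine (in_string/string_char/escaped flags and is_float flags threaded through one while loop) by a token-based scanner: whole quoted-string tokens and whole numeric tokens are cut out by dedicated end-index scanners (escape pairs skipped two at a time, no persistent state between iterations) and integer promotion is decided by a float-marker membership test on the finished token.
import Mathlib
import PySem

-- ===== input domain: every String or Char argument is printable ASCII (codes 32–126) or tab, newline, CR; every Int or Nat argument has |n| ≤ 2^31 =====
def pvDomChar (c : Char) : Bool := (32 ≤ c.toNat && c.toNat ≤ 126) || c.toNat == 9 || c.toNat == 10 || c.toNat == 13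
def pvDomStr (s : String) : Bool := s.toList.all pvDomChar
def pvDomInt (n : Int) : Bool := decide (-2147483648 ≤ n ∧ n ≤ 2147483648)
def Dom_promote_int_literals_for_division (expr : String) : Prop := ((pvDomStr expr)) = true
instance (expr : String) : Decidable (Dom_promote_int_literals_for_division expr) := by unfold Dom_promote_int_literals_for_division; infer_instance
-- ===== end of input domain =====

-- B replaces A's char-at-a-time in_string/escaped state machine by a token-based scanner
-- (whole string/number tokens cut out by end-index helpers, float test by membership on the token): alternative decomposition, same cost.


-- Primitive ports of Python fragments both sources use verbatim:
-- `j < n and expr[j] == c`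
def chAt (s : List Char) (j : Nat) (c : Char) : Bool := s[j]? == some c
-- `expr[k].isalnum() or expr[k] == '_'`
def pvIsWord (c : Char) : Bool := c.isAlphanum || c == '_'
theorem pvDecHelp {L i j : Nat} (hi : i < L) (hij : i < j) : L - j < L - i := by omega

-- `while j < n and expr[j].isdigit(): j += 1`  (A's inner while-loops / B's _digits_end)
def pvSkipDigits (s : List Char) (j : Nat) : Nat :=
  if h : j < s.length then
    if (s[j]!).isDigit then pvSkipDigits s (j+1) else j
  else j
termination_by s.length - j
decreasing_by exact pvDecHelp h (Nat.lt_succ_self j)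
-- `if j < n and expr[j] == '.': <digits>`  (the fraction part of a number)
def pvFracEnd (s : List Char) (j : Nat) : Nat :=
  if chAt s j '.' then pvSkipDigits s (j+1) else j
-- `if j < n and expr[j] in 'eE': [sign] <digits>`  (the exponent part of a number)
def pvExpEnd (s : List Char) (j : Nat) : Nat :=
  if chAt s j 'e' || chAt s j 'E' then
    pvSkipDigits s (if chAt s (j+1) '+' || chAt s (j+1) '-' then j+2 else j+1)
  else j

theorem band_left {a b : Bool} (h : (a && b) = true) : a = true := by
  cases a
  · cases h
  · rfl

theorem pvSkipDigits_le (s : List Char) (j : Nat) : j ≤ pvSkipDigits s j := by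
  fun_induction pvSkipDigits s j <;> omega

theorem pvSkipDigits_step (s : List Char) (j : Nat) (h : j < s.length)
    (hd : (s[j]!).isDigit = true) : pvSkipDigits s j = pvSkipDigits s (j+1) := by
  rw [pvSkipDigits, dif_pos h, if_pos hd]

theorem pvFracEnd_le (s : List Char) (j : Nat) : j ≤ pvFracEnd s j := by
  unfold pvFracEnd
  split
  · have := pvSkipDigits_le s (j+1); omega
  · omega

theorem pvExpEnd_le (s : List Char) (j : Nat) : j ≤ pvExpEnd s j := by
  unfold pvExpEnd
  split
  · have h1 := pvSkipDigits_le s (j+2)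
    have h2 := pvSkipDigits_le s (j+1)
    split <;> omega
  · omega

-- ===== PORT A =====
-- A's number scan starting at a digit: (end index, is_float)
def pvScanNumA (s : List Char) (i : Nat) : Nat × Bool :=
  let i1 := pvSkipDigits s i
  let i2 := pvFracEnd s i1
  let i3 := pvExpEnd s i2
  (i3, chAt s i1 '.' || (chAt s i2 'e' || chAt s i2 'E'))

theorem pvScanNumA_fst_gt (s : List Char) (i : Nat) (h : i < s.length)
    (hd : (s[i]!).isDigit = true) : i < (pvScanNumA s i).1 := by
  have h1 : i + 1 ≤ pvSkipDigits s i := by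
    rw [pvSkipDigits_step s i h hd]; exact pvSkipDigits_le s (i+1)
  have h2 := pvFracEnd_le s (pvSkipDigits s i)
  have h3 := pvExpEnd_le s (pvFracEnd s (pvSkipDigits s i))
  simp only [pvScanNumA]
  omega

def promoAuxA (s : List Char) (i : Nat) (inStr : Bool) (sc : Char) (esc : Bool)
    (out : List Char) : List Char :=
  if h : i < s.length then
    let ch := s[i]!
    if inStr then
      if esc then promoAuxA s (i+1) true sc false (out ++ [ch])
      else if ch == '\\' then promoAuxA s (i+1) true sc true (out ++ [ch])
      else if ch == sc then promoAuxA s (i+1) false sc esc (out ++ [ch])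
      else promoAuxA s (i+1) true sc esc (out ++ [ch])
    else if ch == '"' || ch == '\'' then
      promoAuxA s (i+1) true ch esc (out ++ [ch])
    else if ch.isDigit && (i == 0 || !(pvIsWord (s[i-1]!))) then
      let r := pvScanNumA s i
      let token := (s.drop i).take (r.1 - i)
      let token := if r.2 then token else token ++ ['.', '0']
      promoAuxA s r.1 inStr sc esc (out ++ token)
    else promoAuxA s (i+1) inStr sc esc (out ++ [ch])
  else out
termination_by s.length - i
decreasing_by
  · exact pvDecHelp h (Nat.lt_succ_self i)
  · exact pvDecHelp h (Nat.lt_succ_self i)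
  · exact pvDecHelp h (Nat.lt_succ_self i)
  · exact pvDecHelp h (Nat.lt_succ_self i)
  · exact pvDecHelp h (Nat.lt_succ_self i)
  · have h2 : (s[i]!.isDigit && ((i == 0) || !(pvIsWord (s[i-1]!)))) = true := by assumption
    exact pvDecHelp h (pvScanNumA_fst_gt s i h (band_left h2))
  · exact pvDecHelp h (Nat.lt_succ_self i)

def promote_int_literals_for_division (expr : String) : String :=
  String.mk (promoAuxA expr.toList 0 false ' ' false [])

-- ===== PORT B =====
-- _string_token_end
def pvStrEndB (s : List Char) (j : Nat) (q : Char) : Nat :=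
  if h : j < s.length then
    if s[j]! == '\\' then
      if j + 1 < s.length then pvStrEndB s (j+2) q else j
    else if s[j]! == q then j + 1
    else pvStrEndB s (j+1) q
  else j
termination_by s.length - j
decreasing_by
  · exact pvDecHelp h (Nat.lt_succ_of_lt (Nat.lt_succ_self j))
  · exact pvDecHelp h (Nat.lt_succ_self j)

theorem pvStrEndB_le (s : List Char) (j : Nat) (q : Char) : j ≤ pvStrEndB s j q := by
  fun_induction pvStrEndB s j q <;> omega

-- _number_token_end
def pvNumEndB (s : List Char) (i : Nat) : Nat :=
  pvExpEnd s (pvFracEnd s (pvSkipDigits s (i+1)))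

theorem pvNumEndB_gt (s : List Char) (i : Nat) : i < pvNumEndB s i := by
  have h1 := pvSkipDigits_le s (i+1)
  have h2 := pvFracEnd_le s (pvSkipDigits s (i+1))
  have h3 := pvExpEnd_le s (pvFracEnd s (pvSkipDigits s (i+1)))
  unfold pvNumEndB
  omega

-- `'.' in tok or 'e' in tok or 'E' in tok`
def pvHasFloatMark (tok : List Char) : Bool :=
  tok.contains '.' || tok.contains 'e' || tok.contains 'E'

def promoAuxB (s : List Char) (i : Nat) (out : List Char) : List Char :=
  if h : i < s.length then
    let ch := s[i]!
    if ch == '"' || ch == '\'' then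
      let j := pvStrEndB s (i+1) ch
      promoAuxB s j (out ++ (s.drop i).take (j - i))
    else if ch.isDigit && !(decide (0 < i) && pvIsWord (s[i-1]!)) then
      let j := pvNumEndB s i
      let tok := (s.drop i).take (j - i)
      promoAuxB s j (out ++ (if pvHasFloatMark tok then tok else tok ++ ['.', '0']))
    else promoAuxB s (i+1) (out ++ [ch])
  else out
termination_by s.length - i
decreasing_by
  · exact pvDecHelp h (Nat.lt_of_lt_of_le (Nat.lt_succ_self i) (pvStrEndB_le s (i+1) (s[i]!)))
  · exact pvDecHelp h (pvNumEndB_gt s i)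
  · exact pvDecHelp h (Nat.lt_succ_self i)

def promote_int_literals_for_division_alt (expr : String) : String :=
  String.mk (promoAuxB expr.toList 0 [])

-- ===== PRECONDITION & SPEC =====
def Spec_promote_int_literals_for_division (expr : String) (out : String) : Prop := out = promote_int_literals_for_division_alt expr
instance (expr : String) (out : String) : Decidable (Spec_promote_int_literals_for_division expr out) := by unfold Spec_promote_int_literals_for_division; infer_instance

-- ===== CLAIM (what is proved, stated in full; the proofs are below) =====
def Claim_equal_promote_int_literals_for_division : Prop := ∀ (expr : String), Dom_promote_int_literals_for_division expr → Spec_promote_int_literals_for_division expr (promote_int_literals_for_division expr)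

-- ===== LEMMAS AND PROOFS =====

theorem chAt_true {s : List Char} {j : Nat} {c : Char} (h : chAt s j c = true) :
    j < s.length ∧ s[j]! = c := by
  unfold chAt at h
  rw [beq_iff_eq] at h
  have hj : j < s.length := by
    by_contra hh
    rw [List.getElem?_eq_none (by omega)] at h
    cases h
  refine ⟨hj, ?_⟩
  simp [List.getElem!_eq_getElem?_getD, h]

theorem slice_cons {s : List Char} {j e : Nat} (hj : j < s.length) (hje : j < e) :
    (s.drop j).take (e - j) = s[j]! :: (s.drop (j+1)).take (e - (j+1)) := by
  rw [List.drop_eq_getElem_cons hj]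
  have he : e - j = (e - (j+1)) + 1 := by omega
  rw [he, List.take_succ_cons]
  simp [List.getElem!_eq_getElem?_getD, List.getElem?_eq_getElem hj]

theorem mem_slice {s : List Char} {i e m : Nat} (h1 : i ≤ m) (h2 : m < e) (h3 : m < s.length) :
    s[m]! ∈ (s.drop i).take (e - i) := by
  apply List.mem_of_getElem? (i := m - i)
  rw [List.getElem?_take, if_pos (by omega), List.getElem?_drop]
  have : i + (m - i) = m := by omega
  rw [this]
  simp [List.getElem!_eq_getElem?_getD, List.getElem?_eq_getElem h3]

theorem slice_all_digits {s : List Char} {i e : Nat}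
    (hall : ∀ m, i ≤ m → m < e → m < s.length → (s[m]!).isDigit = true) :
    ∀ x ∈ (s.drop i).take (e - i), x.isDigit = true := by
  intro x hx
  obtain ⟨k, hk⟩ := List.mem_iff_getElem?.1 hx
  rw [List.getElem?_take] at hk
  split at hk
  · rw [List.getElem?_drop] at hk
    have hlen : i + k < s.length := (List.getElem?_eq_some_iff.1 hk).1
    have hx' : x = s[i+k]! := by
      simp [List.getElem!_eq_getElem?_getD, hk]
    rw [hx']
    exact hall (i+k) (by omega) (by omega) hlen
  · cases hk

theorem pvSkipDigits_all (s : List Char) (j : Nat) :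
    ∀ m, j ≤ m → m < pvSkipDigits s j → m < s.length ∧ (s[m]!).isDigit = true := by
  fun_induction pvSkipDigits s j with
  | case1 j h hd ih =>
    intro m hm1 hm2
    rcases Nat.eq_or_lt_of_le hm1 with heq | hlt
    · exact ⟨heq ▸ h, heq ▸ hd⟩
    · exact ih m hlt hm2
  | case2 j h hd =>
    intro m hm1 hm2; omega
  | case3 j h =>
    intro m hm1 hm2; omega

-- A's is_float flag equals B's membership test on the shared token
theorem floatMark_eq (s : List Char) (i : Nat) (h : i < s.length) (hd : (s[i]!).isDigit = true) :
    pvHasFloatMark ((s.drop i).take ((pvScanNumA s i).1 - i)) = (pvScanNumA s i).2 := by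
  have hstep : pvSkipDigits s i = pvSkipDigits s (i+1) := pvSkipDigits_step s i h hd
  set i1 := pvSkipDigits s i with hi1
  set i2 := pvFracEnd s i1 with hi2
  set i3 := pvExpEnd s i2 with hi3
  have hii1 : i < i1 := by
    have := pvSkipDigits_le s (i+1); omega
  have h12 : i1 ≤ i2 := pvFracEnd_le s i1
  have h23 : i2 ≤ i3 := pvExpEnd_le s i2
  have hfst : (pvScanNumA s i).1 = i3 := rfl
  have hsnd : (pvScanNumA s i).2 = (chAt s i1 '.' || (chAt s i2 'e' || chAt s i2 'E')) := rfl
  rw [hfst, hsnd]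
  by_cases hdot : chAt s i1 '.' = true
  · -- token contains the '.' at index i1
    obtain ⟨hl1, hc1⟩ := chAt_true hdot
    have h12' : i1 < i2 := by
      rw [hi2]; unfold pvFracEnd; rw [if_pos hdot]
      have := pvSkipDigits_le s (i1+1); omega
    have hmem : ('.' : Char) ∈ (s.drop i).take (i3 - i) := by
      have := mem_slice (le_of_lt hii1) (by omega : i1 < i3) hl1
      rwa [hc1] at this
    have hres : pvHasFloatMark ((s.drop i).take (i3 - i)) = true := by
      simp [pvHasFloatMark]
      tauto
    rw [hres, hdot]
    simp
  · by_cases he : (chAt s i2 'e' || chAt s i2 'E') = true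
    · -- token contains the 'e'/'E' at index i2
      have h23' : i2 < i3 := by
        rw [hi3]; unfold pvExpEnd; rw [if_pos he]
        have ha := pvSkipDigits_le s (i2+2)
        have hb := pvSkipDigits_le s (i2+1)
        split <;> omega
      rcases Bool.or_eq_true_iff.1 he with he1 | he1 <;>
      · obtain ⟨hl2, hc2⟩ := chAt_true he1
        have hmem := mem_slice (by omega : i ≤ i2) h23' hl2
        rw [hc2] at hmem
        have hres : pvHasFloatMark ((s.drop i).take (i3 - i)) = true := by
          simp [pvHasFloatMark]
          tauto
        rw [hres]
        simp [he]
    · -- no fraction, no exponent: the token is all digits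
      have h2eq : i2 = i1 := by
        rw [hi2]; unfold pvFracEnd; rw [if_neg (by simpa using hdot)]
      have h3eq : i3 = i2 := by
        rw [hi3]; unfold pvExpEnd; rw [if_neg (by simpa using he)]
      have hall : ∀ x ∈ (s.drop i).take (i3 - i), x.isDigit = true := by
        apply slice_all_digits
        intro m hm1 hm2 hm3
        exact (pvSkipDigits_all s i m hm1 (by omega)).2
      have hnone : ∀ c : Char, c.isDigit = false → c ∉ (s.drop i).take (i3 - i) := by
        intro c hc hmemc
        rw [hall c hmemc] at hc
        cases hc
      have hres : pvHasFloatMark ((s.drop i).take (i3 - i)) = false := by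
        simp [pvHasFloatMark]
        exact ⟨⟨hnone '.' (by decide), hnone 'e' (by decide)⟩, hnone 'E' (by decide)⟩
      rw [hres]
      simp only [Bool.not_eq_true] at hdot he
      rw [hdot, he]
      rfl

theorem scanNum_eq_numEnd (s : List Char) (i : Nat) (h : i < s.length)
    (hd : (s[i]!).isDigit = true) : (pvScanNumA s i).1 = pvNumEndB s i := by
  simp only [pvScanNumA, pvNumEndB, pvSkipDigits_step s i h hd]

theorem lookback_eq (i : Nat) (b : Bool) :
    ((i == 0) || !b) = !(decide (0 < i) && b) := by
  cases i <;> simp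

-- the joint induction: A's not-in-string state vs B, and A's in-string run vs B's string token
theorem pvKey : ∀ n : Nat, ∀ s : List Char,
    (∀ i sc out, s.length - i ≤ n →
      promoAuxA s i false sc false out = promoAuxB s i out) ∧
    (∀ j q out, s.length - j ≤ n →
      promoAuxA s j true q false out
        = promoAuxB s (pvStrEndB s j q) (out ++ (s.drop j).take (pvStrEndB s j q - j))) := by
  intro n
  induction n using Nat.strong_induction_on with
  | _ n IH =>
    intro s
    constructor
    · -- keyA
      intro i sc out hn
      by_cases h : i < s.length
      · have hn1 : 1 ≤ n := by omega
        have hm : n - 1 < n := by omega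
        rw [promoAuxA, promoAuxB, dif_pos h, dif_pos h]
        simp only [Bool.false_eq_true, if_false]
        by_cases hq : (s[i]! == '"' || s[i]! == '\'') = true
        · rw [if_pos hq, if_pos hq]
          have hE := pvStrEndB_le s (i+1) (s[i]!)
          have := ((IH (n-1) hm s).2) (i+1) (s[i]!) (out ++ [s[i]!]) (by omega)
          rw [this, slice_cons h (by omega)]
          simp
        · rw [if_neg hq, if_neg hq, ← lookback_eq]
          by_cases hdig : (s[i]!.isDigit && ((i == 0) || !(pvIsWord (s[i-1]!)))) = true
          · rw [if_pos hdig, if_pos hdig]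
            have hd : (s[i]!).isDigit = true := band_left hdig
            have hgt := pvScanNumA_fst_gt s i h hd
            have heq := scanNum_eq_numEnd s i h hd
            have hfm := floatMark_eq s i h hd
            rw [← heq]
            have := ((IH (n-1) hm s).1) (pvScanNumA s i).1 sc
              (out ++ (if (pvScanNumA s i).2 then (s.drop i).take ((pvScanNumA s i).1 - i)
                       else (s.drop i).take ((pvScanNumA s i).1 - i) ++ ['.', '0'])) (by omega)
            rw [this, hfm]
          · rw [if_neg hdig, if_neg hdig]
            exact ((IH (n-1) hm s).1) (i+1) sc (out ++ [s[i]!]) (by omega)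
      · rw [promoAuxA, promoAuxB, dif_neg h, dif_neg h]
    · -- keyStr
      intro j q out hn
      by_cases h : j < s.length
      · have hn1 : 1 ≤ n := by omega
        have hm : n - 1 < n := by omega
        rw [promoAuxA, dif_pos h]
        simp only [if_true, Bool.false_eq_true, if_false]
        by_cases hb : (s[j]! == '\\') = true
        · rw [if_pos hb]
          have hbc : s[j]! = '\\' := beq_iff_eq.1 hb
          by_cases h1 : j + 1 < s.length
          · -- escape pair: A consumes two characters in two steps
            have hE : pvStrEndB s j q = pvStrEndB s (j+2) q := by
              rw [pvStrEndB, dif_pos h, if_pos hb, if_pos h1]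
            rw [promoAuxA, dif_pos h1]
            simp only [if_true]
            have hE2 := pvStrEndB_le s (j+2) q
            have := ((IH (n-1) hm s).2) (j+2) q ((out ++ [s[j]!]) ++ [s[j+1]!]) (by omega)
            rw [this, hE, slice_cons h (by omega), slice_cons h1 (by omega)]
            simp
          · -- lone trailing backslash: both end with it appended
            have hE : pvStrEndB s j q = j := by
              rw [pvStrEndB, dif_pos h, if_pos hb, if_neg h1]
            have hend : ¬ j + 1 < s.length := h1
            rw [promoAuxA, dif_neg hend, hE]
            rw [promoAuxB, dif_pos h]
            have hnq : ¬ ((s[j]! == '"' || s[j]! == '\'') = true) := by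
              rw [hbc]; decide
            have hnd : ¬ ((s[j]!.isDigit && !(decide (0 < j) && pvIsWord (s[j-1]!))) = true) := by
              rw [hbc]
              simp [show ('\\').isDigit = false by decide]
            rw [if_neg hnq, if_neg hnd]
            rw [promoAuxB, dif_neg hend]
            simp
        · rw [if_neg hb]
          by_cases hq : (s[j]! == q) = true
          · -- closing quote
            have hE : pvStrEndB s j q = j + 1 := by
              rw [pvStrEndB, dif_pos h, if_neg hb, if_pos hq]
            rw [if_pos hq, hE]
            have := ((IH (n-1) hm s).1) (j+1) q (out ++ [s[j]!]) (by omega)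
            rw [this, slice_cons h (by omega)]
            simp
          · -- ordinary in-string character
            have hE : pvStrEndB s j q = pvStrEndB s (j+1) q := by
              rw [pvStrEndB, dif_pos h, if_neg hb, if_neg hq]
            rw [if_neg hq]
            have hE2 := pvStrEndB_le s (j+1) q
            have := ((IH (n-1) hm s).2) (j+1) q (out ++ [s[j]!]) (by omega)
            rw [this, hE, slice_cons h (by omega)]
            simp
      · have hE : pvStrEndB s j q = j := by
          rw [pvStrEndB, dif_neg h]
        rw [promoAuxA, dif_neg h, hE]
        rw [promoAuxB, dif_neg h]
        simp

-- ===== VERDICT (by name: the statement is the Claim_ definition above) =====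
theorem promote_int_literals_for_division_spec : Claim_equal_promote_int_literals_for_division := by
  intro expr _
  unfold Spec_promote_int_literals_for_division
  unfold promote_int_literals_for_division promote_int_literals_for_division_alt
  rw [((pvKey expr.toList.length expr.toList).1) 0 ' ' [] (by omega)]
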